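-- pv_equiv track=rewrite | github.com/SveterCZE/advent-of-code-2015 | day5/day5.py | three_vowels
-- ===== SOURCE A (Python) =====
-- def three_vowels(word):
--     wovels = "aeiou"
--     wovel_count = 0
--     for letter in word:
--         if letter in wovels:
--             wovel_count +=1
--     if wovel_count >= 3:
--         return True
--     else:
--         return False
-- ===== SOURCE B (Python) =====
-- def three_vowels(word):
--     return sum(word.count(v) for v in "aeiou") >= 3
-- ===== Notes on version B (the rewrite author's own statement) =====
-- stated objective: idiomatic
-- what changed: Replaces the per-letter Python loop with a running counter by one str.count pass per vowel, summed and compared to 3 in a single expression.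
import Mathlib
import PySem

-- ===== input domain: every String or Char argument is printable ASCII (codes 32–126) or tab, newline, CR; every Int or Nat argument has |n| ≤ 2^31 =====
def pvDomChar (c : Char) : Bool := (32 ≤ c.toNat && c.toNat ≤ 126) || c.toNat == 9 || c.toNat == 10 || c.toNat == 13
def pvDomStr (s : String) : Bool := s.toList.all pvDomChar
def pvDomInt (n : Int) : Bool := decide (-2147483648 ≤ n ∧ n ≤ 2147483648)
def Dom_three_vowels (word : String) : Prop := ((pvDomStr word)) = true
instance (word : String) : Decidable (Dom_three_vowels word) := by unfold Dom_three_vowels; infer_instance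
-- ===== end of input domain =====

-- B replaces the per-letter scan with a counter by summing one str.count per vowel: idiomatic one-liner, measurably faster in CPython (C-level counting).


-- ===== PORT A =====
-- for letter in word: if letter in "aeiou": wovel_count += 1; return wovel_count >= 3
def three_vowels (word : String) : Bool :=
  let wovels : String := "aeiou"
  let wovel_count : Int :=
    word.toList.foldl
      (fun acc letter => if PySem.Chars.isIn [letter] wovels.toList then acc + 1 else acc) 0
  if wovel_count ≥ 3 then true else false

-- ===== PORT B =====
-- return sum(word.count(v) for v in "aeiou") >= 3
def three_vowels_alt (word : String) : Bool :=
  decide ((("aeiou".toList.map (fun v => (PySem.Str.count word (String.ofList [v]) : Int))).sum) ≥ 3)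

-- ===== PRECONDITION & SPEC =====
def Spec_three_vowels (word : String) (out : Bool) : Prop := out = three_vowels_alt word
instance (word : String) (out : Bool) : Decidable (Spec_three_vowels word out) := by unfold Spec_three_vowels; infer_instance

-- ===== CLAIM (what is proved, stated in full; the proofs are below) =====
def Claim_equal_three_vowels : Prop := ∀ (word : String), Dom_three_vowels word → Spec_three_vowels word (three_vowels word)

-- ===== LEMMAS AND PROOFS =====

-- Chars.count.go with a single-char needle counts occurrences of that char
theorem count_go_singleton (v : Char) (l : List Char) (fuel acc : Nat)
    (h : l.length ≤ fuel) :
    PySem.Chars.count.go [v] fuel l acc = acc + l.count v := by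
  induction l generalizing fuel acc with
  | nil => cases fuel <;> simp [PySem.Chars.count.go]
  | cons x t ih =>
    cases fuel with
    | zero => simp at h
    | succ n =>
      simp only [List.length_cons, Nat.succ_le_succ_iff] at h
      by_cases hx : x = v
      · subst hx
        simp [PySem.Chars.count.go, List.isPrefixOf, ih n _ h]
        omega
      · simp [PySem.Chars.count.go, List.isPrefixOf, hx, ih n _ h,
          Ne.symm hx]

theorem count_singleton (s : List Char) (v : Char) :
    PySem.Chars.count s [v] = s.count v := by
  simp [PySem.Chars.count, count_go_singleton v s s.length 0 le_rfl]

-- single-char `in` is list membership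
theorem isIn_singleton (c : Char) (l : List Char) :
    PySem.Chars.isIn [c] l = l.contains c := by
  rcases h : l.contains c with _ | _
  · simp only [List.contains_eq_mem, decide_eq_false_iff_not] at h
    rw [Bool.eq_false_iff]
    intro hh
    rw [PySem.Chars.isIn_iff_infix] at hh
    exact h (hh.mem (by simp))
  · simp only [List.contains_eq_mem, decide_eq_true_eq] at h
    rw [PySem.Chars.isIn_iff_infix]
    rcases List.mem_iff_append.mp h with ⟨sl, tl, rfl⟩
    exact ⟨sl, tl, by simp⟩

-- counting members of a nodup list = summing per-element counts
theorem countP_orb (p q : Char → Bool) (s : List Char) :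
    s.countP (fun c => p c || q c) + s.countP (fun c => p c && q c)
      = s.countP p + s.countP q := by
  induction s with
  | nil => simp
  | cons x t ih =>
    simp only [List.countP_cons]
    cases hp : p x <;> cases hq : q x <;> simp <;> omega

theorem countP_mem_eq_sum (vs : List Char) (hvs : vs.Nodup) (s : List Char) :
    (s.countP (fun c => vs.contains c) : Int)
      = (vs.map (fun v => (s.count v : Int))).sum := by
  induction vs with
  | nil => simp
  | cons v t ih =>
    rcases List.nodup_cons.mp hvs with ⟨hv, ht⟩
    have horb := countP_orb (fun c => c == v) (fun c => t.contains c) s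
    have hand : s.countP (fun c => (c == v) && t.contains c) = 0 := by
      rw [List.countP_eq_zero]
      intro c _ hc
      simp at hc
      exact hv (hc.1 ▸ hc.2)
    have : s.countP (fun c => (v :: t).contains c)
        = s.countP (fun c => c == v) + s.countP (fun c => t.contains c) := by
      rw [← horb, hand]
      simp only [Nat.add_zero]
      apply List.countP_congr
      intro c _
      simp
    rw [List.map_cons, List.sum_cons, ← ih ht, this, List.count]
    push_cast
    ring

-- ===== VERDICT (by name: the statement is the Claim_ definition above) =====
theorem three_vowels_spec : Claim_equal_three_vowels := by
  intro word _
  unfold Spec_three_vowels three_vowels three_vowels_alt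
  simp only [PySem.List.foldl_if_add_one, zero_add]
  have : (word.toList.countP (fun letter => PySem.Chars.isIn [letter] "aeiou".toList) : Int)
      = ("aeiou".toList.map (fun v => (PySem.Str.count word (String.ofList [v]) : Int))).sum := by
    rw [show (fun letter => PySem.Chars.isIn [letter] "aeiou".toList)
        = fun letter => "aeiou".toList.contains letter from funext fun c => isIn_singleton c _]
    rw [countP_mem_eq_sum "aeiou".toList (by decide)]
    simp [PySem.Str.count_eq, count_singleton]
  rw [this]
  simp
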